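-- pv_equiv track=rewrite | github.com/femiaiyeku/Algorithm_Exprt_Project | Greedy_Algorithms/Valid_Starting_City/solution_2.py | validStartingCity
-- ===== SOURCE A (Python) =====
-- def validStartingCity(distances, fuel, mpg):
--     biggestNegative = 0
--     beatStartIndex = 0
--     currSum = 0
--     for i in range(len(distances)):
--         currSum += fuel[i] * mpg - distances[i]
--         if currSum < biggestNegative:
--             biggestNegative = currSum
--             beatStartIndex = i + 1
--     return beatStartIndex
-- ===== SOURCE B (Python) =====
-- def validStartingCity(distances, fuel, mpg):
--     prefix = [0]
--     for i in range(len(distances)):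
--         prefix.append(prefix[-1] + fuel[i] * mpg - distances[i])
--     return prefix.index(min(prefix))
-- ===== Notes on version B (the rewrite author's own statement) =====
-- stated objective: simpler
-- what changed: Replaces the running min/argmin state tracking with building the cumulative prefix-sum table (starting at 0) and returning prefix.index(min(prefix)), which picks the first index of the minimum cumulative value.
import Mathlib
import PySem

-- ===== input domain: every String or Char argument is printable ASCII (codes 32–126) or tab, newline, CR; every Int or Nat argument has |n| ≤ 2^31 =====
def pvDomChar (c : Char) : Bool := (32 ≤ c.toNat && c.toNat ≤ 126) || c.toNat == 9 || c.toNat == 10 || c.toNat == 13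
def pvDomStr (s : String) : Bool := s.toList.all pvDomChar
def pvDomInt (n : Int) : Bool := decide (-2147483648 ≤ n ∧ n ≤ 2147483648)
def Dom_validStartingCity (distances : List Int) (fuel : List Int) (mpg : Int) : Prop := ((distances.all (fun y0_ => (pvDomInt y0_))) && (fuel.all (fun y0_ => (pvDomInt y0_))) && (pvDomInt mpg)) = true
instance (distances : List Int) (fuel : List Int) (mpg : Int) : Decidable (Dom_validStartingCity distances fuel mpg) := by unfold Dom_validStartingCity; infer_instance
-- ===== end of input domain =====

-- B replaces A's running min/argmin state tracking by building the full prefix-sum table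
-- and returning the first index of its minimum (objective: simpler decomposition).


-- ===== PORT A =====
def validStartingCity (distances : List Int) (fuel : List Int) (mpg : Int) : Int :=
  let s := (PySem.List.pyRange 0 (distances.length) 1).foldl
    (fun (st : Int × Int × Int) i =>
      let cs := st.2.2 + (PySem.List.pyGetD fuel i 0 * mpg - PySem.List.pyGetD distances i 0)
      if cs < st.1 then (cs, i + 1, cs) else (st.1, st.2.1, cs))
    ((0 : Int), (0 : Int), (0 : Int))
  s.2.1

-- ===== PORT B =====
def validStartingCity_alt (distances : List Int) (fuel : List Int) (mpg : Int) : Int :=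
  let pref := (PySem.List.pyRange 0 (distances.length) 1).foldl
    (fun (acc : List Int) i =>
      acc ++ [PySem.List.pyGetD acc (-1) 0 + PySem.List.pyGetD fuel i 0 * mpg - PySem.List.pyGetD distances i 0])
    [0]
  let m := (PySem.List.min? pref (fun x => x)).getD 0
  ((PySem.List.index? pref m).getD 0 : Nat)

-- ===== PRECONDITION & SPEC =====
-- Pre_ excludes exactly the inputs where Python raises IndexError: fuel shorter than distances.
def Pre_validStartingCity (distances : List Int) (fuel : List Int) (mpg : Int) : Prop :=
  distances.length ≤ fuel.length
instance (distances : List Int) (fuel : List Int) (mpg : Int) : Decidable (Pre_validStartingCity distances fuel mpg) := by unfold Pre_validStartingCity; infer_instance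
def pvWitness_validStartingCity : List Int × List Int × Int := ([3, 1, 2], [1, 2, 1], 2)

def Spec_validStartingCity (distances : List Int) (fuel : List Int) (mpg : Int) (out : Int) : Prop := out = validStartingCity_alt distances fuel mpg
instance (distances : List Int) (fuel : List Int) (mpg : Int) (out : Int) : Decidable (Spec_validStartingCity distances fuel mpg out) := by unfold Spec_validStartingCity; infer_instance

-- ===== CLAIM (what is proved, stated in full; the proofs are below) =====
def Claim_equal_validStartingCity : Prop := ∀ (distances : List Int) (fuel : List Int) (mpg : Int), Dom_validStartingCity distances fuel mpg → Pre_validStartingCity distances fuel mpg → Spec_validStartingCity distances fuel mpg (validStartingCity distances fuel mpg)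

-- ===== LEMMAS AND PROOFS =====

-- Invariant relating A's running state to B's prefix table after n loop iterations.
theorem pv_inv (distances fuel : List Int) (mpg : Int) (n : Nat)
    (p : List Int) (s : Int × Int × Int)
    (hp : p = (PySem.List.pyRange 0 (n : Int) 1).foldl
        (fun (acc : List Int) i =>
          acc ++ [PySem.List.pyGetD acc (-1) 0 + PySem.List.pyGetD fuel i 0 * mpg - PySem.List.pyGetD distances i 0])
        [0])
    (hs : s = (PySem.List.pyRange 0 (n : Int) 1).foldl
        (fun (st : Int × Int × Int) i =>
          let cs := st.2.2 + (PySem.List.pyGetD fuel i 0 * mpg - PySem.List.pyGetD distances i 0)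
          if cs < st.1 then (cs, i + 1, cs) else (st.1, st.2.1, cs))
        ((0 : Int), (0 : Int), (0 : Int))) :
    p.length = n + 1 ∧ p.getLast? = some s.2.2 ∧ s.1 ∈ p ∧ (∀ y ∈ p, s.1 ≤ y) ∧
      ∃ k : Nat, PySem.List.index? p s.1 = some k ∧ s.2.1 = (k : Int) := by
  induction n generalizing p s with
  | zero =>
      rw [show ((0 : Nat) : Int) = 0 from rfl, PySem.List.pyRange_one_eq_nil (le_refl 0)] at hp hs
      subst hp; subst hs
      refine ⟨rfl, rfl, by simp, by simp, 0, ?_, rfl⟩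
      exact PySem.List.index?_cons_self 0 []
  | succ n ih =>
      have hr : PySem.List.pyRange 0 ((n : Int) + 1) 1
          = PySem.List.pyRange 0 (n : Int) 1 ++ [(n : Int)] :=
        PySem.List.pyRange_one_succ_right (by positivity)
      rw [show (((n + 1 : Nat)) : Int) = (n : Int) + 1 by push_cast; ring, hr,
        List.foldl_append, List.foldl_cons, List.foldl_nil] at hp hs
      obtain ⟨hlen, hlast, hmem, hmin, k, hidx, hK⟩ :=
        ih (p := (PySem.List.pyRange 0 (n : Int) 1).foldl
            (fun (acc : List Int) i =>
              acc ++ [PySem.List.pyGetD acc (-1) 0 + PySem.List.pyGetD fuel i 0 * mpg - PySem.List.pyGetD distances i 0])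
            [0])
          (s := (PySem.List.pyRange 0 (n : Int) 1).foldl
            (fun (st : Int × Int × Int) i =>
              let cs := st.2.2 + (PySem.List.pyGetD fuel i 0 * mpg - PySem.List.pyGetD distances i 0)
              if cs < st.1 then (cs, i + 1, cs) else (st.1, st.2.1, cs))
            ((0 : Int), (0 : Int), (0 : Int))) rfl rfl
      set p0 := (PySem.List.pyRange 0 (n : Int) 1).foldl
          (fun (acc : List Int) i =>
            acc ++ [PySem.List.pyGetD acc (-1) 0 + PySem.List.pyGetD fuel i 0 * mpg - PySem.List.pyGetD distances i 0])
          [0] with hp0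
      set s0 := (PySem.List.pyRange 0 (n : Int) 1).foldl
          (fun (st : Int × Int × Int) i =>
            let cs := st.2.2 + (PySem.List.pyGetD fuel i 0 * mpg - PySem.List.pyGetD distances i 0)
            if cs < st.1 then (cs, i + 1, cs) else (st.1, st.2.1, cs))
          ((0 : Int), (0 : Int), (0 : Int)) with hs0
      have hpne : p0 ≠ [] := by intro h; rw [h] at hlen; simp at hlen
      have hL : PySem.List.pyGetD p0 (-1) 0 = s0.2.2 := by
        rw [PySem.List.pyGetD_neg_one (h := hpne)]
        rw [List.getLast?_eq_some_getLast (l := p0) hpne] at hlast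
        exact Option.some_inj.mp hlast
      set δ : Int := PySem.List.pyGetD fuel (n : Int) 0 * mpg - PySem.List.pyGetD distances (n : Int) 0 with hδ
      have hpeq : p = p0 ++ [s0.2.2 + δ] := by
        rw [hp, hL]; congr 1; simp [hδ]; ring
      have hseq : s = (if s0.2.2 + δ < s0.1 then ((s0.2.2 + δ), ((n : Int) + 1), (s0.2.2 + δ))
          else (s0.1, s0.2.1, s0.2.2 + δ)) := by
        rw [hs]
      by_cases hc : s0.2.2 + δ < s0.1
      · rw [if_pos hc] at hseq
        subst hpeq; subst hseq
        have hnotmem : s0.2.2 + δ ∉ p0 := fun hm => absurd (hmin _ hm) (by omega)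
        refine ⟨by simp [hlen], by simp, by simp, ?_, p0.length, ?_, by simp [hlen]⟩
        · intro y hy
          rcases List.mem_append.mp hy with hy | hy
          · have := hmin _ hy; omega
          · simp at hy; omega
        · exact PySem.List.index?_append_singleton_self p0 _ hnotmem
      · rw [if_neg hc] at hseq
        subst hpeq; subst hseq
        refine ⟨by simp [hlen], by simp, List.mem_append.mpr (Or.inl hmem), ?_,
          k, ?_, hK⟩
        · intro y hy
          rcases List.mem_append.mp hy with hy | hy
          · exact hmin _ hy
          · simp at hy; omega
        · rw [PySem.List.index?_append_of_mem _ hmem]; exact hidx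

-- ===== VERDICT (by name: the statement is the Claim_ definition above) =====
theorem validStartingCity_spec : Claim_equal_validStartingCity := by
  intro distances fuel mpg _ _
  unfold Spec_validStartingCity validStartingCity validStartingCity_alt
  obtain ⟨hlen, hlast, hmem, hmin, k, hidx, hK⟩ :=
    pv_inv distances fuel mpg distances.length _ _ rfl rfl
  set p := (PySem.List.pyRange 0 (distances.length : Int) 1).foldl
      (fun (acc : List Int) i =>
        acc ++ [PySem.List.pyGetD acc (-1) 0 + PySem.List.pyGetD fuel i 0 * mpg - PySem.List.pyGetD distances i 0])
      [0] with hp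
  set s := (PySem.List.pyRange 0 (distances.length : Int) 1).foldl
      (fun (st : Int × Int × Int) i =>
        let cs := st.2.2 + (PySem.List.pyGetD fuel i 0 * mpg - PySem.List.pyGetD distances i 0)
        if cs < st.1 then (cs, i + 1, cs) else (st.1, st.2.1, cs))
      ((0 : Int), (0 : Int), (0 : Int)) with hs
  have hpne : p ≠ [] := by intro h; rw [h] at hlen; simp at hlen
  obtain ⟨m, hm⟩ : ∃ m, PySem.List.min? p (fun x => x) = some m := by
    cases hmq : PySem.List.min? p (fun x => x) with
    | none => exact absurd ((PySem.List.min?_eq_none_iff _ _).mp hmq) hpne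
    | some m => exact ⟨m, rfl⟩
  have hmmem : m ∈ p := PySem.List.min?_mem hm
  have hmmin : ∀ y ∈ p, m ≤ y := PySem.List.min?_isMin hm
  have hms : m = s.1 := le_antisymm (hmmin _ hmem) (hmin _ hmmem)
  simp only [hm, Option.getD_some, hms, hidx]
  exact hK
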